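-- pv_equiv track=rewrite | github.com/vladyslavkrasnyy/myfrench | utils/config_generate.py | group_verbs
-- ===== SOURCE A (Python) =====
-- def group_verbs(topics):
--     """Group verb files together, matching base and imperfect forms"""
--     verb_groups = {}
--     non_verb_topics = []
--
--     # Common French verbs to prioritize
--     common_verbs = [
--         'etre', 'avoir', 'aller', 'faire', 'dire', 'pouvoir',
--         'vouloir', 'voir', 'savoir', 'venir', 'devoir', 'parler',
--         'finir', 'mettre', 'prendre'
--     ]
--
--     # First add common verbs in specific order
--     for verb in common_verbs:
--         if verb in topics or f"{verb}-imparfe" in topics: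
--             verb_groups[verb] = []
--             if verb in topics:
--                 verb_groups[verb].append(verb)
--             if f"{verb}-imparfe" in topics:
--                 verb_groups[verb].append(f"{verb}-imparfe")
--
--     # Then add any other verb-like files
--     for topic in topics:
--         if topic.endswith('-imparfe') or topic in common_verbs:
--             base_verb = topic.replace('-imparfe', '')
--             if base_verb not in verb_groups:
--                 verb_groups[base_verb] = []
--             if topic not in verb_groups[base_verb]:
--                 verb_groups[base_verb].append(topic)
--         else:
--             non_verb_topics.append(topic)
--
--     # Flatten verb groups in order
--     ordered_verbs = []
--     for verb in common_verbs:  # Use common_verbs order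
--         if verb in verb_groups:
--             ordered_verbs.extend(sorted(verb_groups[verb]))
--
--     return ordered_verbs, non_verb_topics
-- ===== SOURCE B (Python) =====
-- def group_verbs(topics):
--     """Group verb files together, matching base and imperfect forms"""
--     common_verbs = [
--         'etre', 'avoir', 'aller', 'faire', 'dire', 'pouvoir',
--         'vouloir', 'voir', 'savoir', 'venir', 'devoir', 'parler',
--         'finir', 'mettre', 'prendre'
--     ]
--
--     ordered_verbs = []
--     for verb in common_verbs:
--         forms = {t for t in topics
--                  if t == verb or (t.endswith('-imparfe')
--                                   and t.replace('-imparfe', '') == verb)}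
--         ordered_verbs.extend(sorted(forms))
--
--     non_verb_topics = [t for t in topics
--                        if not t.endswith('-imparfe') and t not in common_verbs]
--     return ordered_verbs, non_verb_topics
-- ===== Notes on version B (the rewrite author's own statement) =====
-- stated objective: simpler
-- what changed: Drops A's two-phase mutable dict of verb groups entirely: B computes each common verb's group directly as sorted({t in topics matching that verb}) in one pass per verb and builds non_verb_topics with a single comprehension.
import Mathlib
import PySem

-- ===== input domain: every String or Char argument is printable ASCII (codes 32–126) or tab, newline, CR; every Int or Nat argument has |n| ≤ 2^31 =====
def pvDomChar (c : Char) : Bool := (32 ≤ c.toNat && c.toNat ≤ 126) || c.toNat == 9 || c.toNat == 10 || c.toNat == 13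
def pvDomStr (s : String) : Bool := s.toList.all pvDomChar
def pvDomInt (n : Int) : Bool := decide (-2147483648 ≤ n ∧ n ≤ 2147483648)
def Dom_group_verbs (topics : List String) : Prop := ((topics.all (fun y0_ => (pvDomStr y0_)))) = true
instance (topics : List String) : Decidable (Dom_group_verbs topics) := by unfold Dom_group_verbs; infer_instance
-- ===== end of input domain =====

-- B replaces A's two-phase mutable dict of verb groups by one sorted set comprehension per common verb (simpler); equal output proved below.

-- ===== PORT A =====
def commonVerbsA : List String :=
  ["etre", "avoir", "aller", "faire", "dire", "pouvoir",
   "vouloir", "voir", "savoir", "venir", "devoir", "parler",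
   "finir", "mettre", "prendre"]

-- body of the first loop: "verb_groups[verb] = []; if …: append(verb); if …: append(verb-imparfe)"
def gvStep1 (topics : List String) (d : PySem.Dict String (List String)) (v : String) : PySem.Dict String (List String) :=
  if topics.contains v || topics.contains (v ++ "-imparfe") then
    let d := d.insert v []
    let d := if topics.contains v then d.modify v [] (fun g => g ++ [v]) else d
    if topics.contains (v ++ "-imparfe") then d.modify v [] (fun g => g ++ [v ++ "-imparfe"]) else d
  else d

-- first loop: "for verb in common_verbs: …"
def gvLoop1 (topics : List String) : List String → PySem.Dict String (List String) → PySem.Dict String (List String)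
  | [], d => d
  | v :: vs, d => gvLoop1 topics vs (gvStep1 topics d v)

-- body of the second loop, verb-like branch: "base = topic.replace(…); if base not in …: …; if topic not in …: append"
def gvStep2 (d : PySem.Dict String (List String)) (t : String) : PySem.Dict String (List String) :=
  let base := PySem.Str.replace t "-imparfe" ""
  let d := if d.contains base = false then d.insert base [] else d
  if (d.getD base []).contains t = false then d.modify base [] (fun g => g ++ [t]) else d

-- second loop: "for topic in topics: …"
def gvLoop2 : List String → PySem.Dict String (List String) → List String → PySem.Dict String (List String) × List String
  | [], d, nv => (d, nv)
  | t :: ts, d, nv =>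
    if PySem.Str.endswith t "-imparfe" || commonVerbsA.contains t then
      gvLoop2 ts (gvStep2 d t) nv
    else gvLoop2 ts d (nv ++ [t])

-- third loop: "for verb in common_verbs: if verb in verb_groups: ordered_verbs.extend(sorted(…))"
def gvFlatten (d : PySem.Dict String (List String)) : List String → List String → List String
  | [], acc => acc
  | v :: vs, acc =>
    gvFlatten d vs (if d.contains v then acc ++ PySem.List.sorted (d.getD v []) (fun x => x) false else acc)

def group_verbs (topics : List String) : List String × List String :=
  let d1 := gvLoop1 topics commonVerbsA PySem.Dict.empty
  let r := gvLoop2 topics d1 []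
  (gvFlatten r.1 commonVerbsA [], r.2)

-- ===== PORT B =====
def commonVerbsB : List String :=
  ["etre", "avoir", "aller", "faire", "dire", "pouvoir",
   "vouloir", "voir", "savoir", "venir", "devoir", "parler",
   "finir", "mettre", "prendre"]

-- "t == verb or (t.endswith('-imparfe') and t.replace('-imparfe', '') == verb)"
def gvMatches (v t : String) : Bool :=
  t == v || (PySem.Str.endswith t "-imparfe" && PySem.Str.replace t "-imparfe" "" == v)

def group_verbs_alt (topics : List String) : List String × List String :=
  let ordered := commonVerbsB.foldl
    (fun acc v => acc ++ PySem.List.sorted (PySem.Set.ofList (topics.filter (fun t => gvMatches v t))) (fun x => x) false) []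
  let nonVerb := topics.filter (fun t => !PySem.Str.endswith t "-imparfe" && !commonVerbsB.contains t)
  (ordered, nonVerb)

-- ===== PRECONDITION & SPEC =====
def Spec_group_verbs (topics : List String) (out : List String × List String) : Prop := out = group_verbs_alt topics
instance (topics : List String) (out : List String × List String) : Decidable (Spec_group_verbs topics out) := by unfold Spec_group_verbs; infer_instance

-- ===== CLAIM (what is proved, stated in full; the proofs are below) =====
def Claim_equal_group_verbs : Prop := ∀ (topics : List String), Dom_group_verbs topics → Spec_group_verbs topics (group_verbs topics)

-- ===== LEMMAS AND PROOFS =====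

-- the group A's dict holds for verb v after the first loop
def gvGrp (topics : List String) (v : String) : List String :=
  (if topics.contains v then [v] else []) ++ (if topics.contains (v ++ "-imparfe") then [v ++ "-imparfe"] else [])

-- invariant on A's dict: for every common verb v the stored group is exactly
-- { t | (t = v ∨ t = v-imparfe) ∧ t ∈ topics } ∪ { t ∈ processed prefix p | gvMatches v t }
def gvInv (topics p : List String) (d : PySem.Dict String (List String)) : Prop :=
  ∀ v ∈ commonVerbsA,
    (d.contains v = false →
      topics.contains v = false ∧ topics.contains (v ++ "-imparfe") = false ∧
      ∀ t ∈ p, gvMatches v t = false) ∧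
    (d.contains v = true →
      (d.getD v []).Nodup ∧
      ∀ t, (t ∈ d.getD v [] ↔
        ((t = v ∨ t = v ++ "-imparfe") ∧ t ∈ topics) ∨ (t ∈ p ∧ gvMatches v t = true)))

lemma cv_facts : ∀ v ∈ commonVerbsA,
    PySem.Str.replace v "-imparfe" "" = v ∧
    PySem.Str.replace (v ++ "-imparfe") "-imparfe" "" = v ∧
    PySem.Str.endswith (v ++ "-imparfe") "-imparfe" = true ∧
    v ≠ v ++ "-imparfe" ∧
    PySem.Str.endswith v "-imparfe" = false := by decide

lemma gvMatches_self (v : String) (hv : v ∈ commonVerbsA) : gvMatches v v = true := by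
  simp [gvMatches]

lemma gvMatches_imp (v : String) (hv : v ∈ commonVerbsA) : gvMatches v (v ++ "-imparfe") = true := by
  obtain ⟨_, h2, h3, _, _⟩ := cv_facts v hv
  unfold gvMatches
  rw [h3, h2]
  simp

lemma gvMatches_iff (v t : String) (hv : v ∈ commonVerbsA)
    (hcnd : (PySem.Str.endswith t "-imparfe" || commonVerbsA.contains t) = true) :
    (gvMatches v t = true ↔ PySem.Str.replace t "-imparfe" "" = v) := by
  obtain ⟨h1, _, _, _, _⟩ := cv_facts v hv
  constructor
  · intro hm
    rcases Bool.or_eq_true_iff.mp hm with h | h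
    · rw [beq_iff_eq] at h; subst h; exact h1
    · exact beq_iff_eq.mp (Bool.and_eq_true_iff.mp h).2
  · intro hb
    rcases Bool.or_eq_true_iff.mp hcnd with h | h
    · unfold gvMatches
      rw [h, hb]
      simp
    · have ht := List.contains_iff_mem.mp h
      obtain ⟨ht1, _, _, _, _⟩ := cv_facts t ht
      rw [ht1] at hb; subst hb
      unfold gvMatches
      simp

lemma gvMatches_false (v t : String) (hv : v ∈ commonVerbsA)
    (hcnd : (PySem.Str.endswith t "-imparfe" || commonVerbsA.contains t) = false) :
    gvMatches v t = false := by
  rcases Bool.or_eq_false_iff.mp hcnd with ⟨h1, h2⟩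
  have : (t == v) = false := by
    rw [beq_eq_false_iff_ne]
    intro h; subst h
    simp at h2
    exact h2 hv
  unfold gvMatches
  rw [this, h1]
  rfl

-- ---- first loop ----

lemma gvStep1_contains (topics : List String) (d : PySem.Dict String (List String)) (c v : String) :
    ((gvStep1 topics d c).contains v = true ↔
      (v = c ∧ (topics.contains c || topics.contains (c ++ "-imparfe")) = true) ∨ d.contains v = true) := by
  unfold gvStep1
  by_cases m1 : c ∈ topics <;> by_cases m2 : c ++ "-imparfe" ∈ topics <;>
    simp [m1, m2, PySem.Dict.contains_modify, PySem.Dict.contains_insert, beq_iff_eq] <;> tauto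

lemma gvStep1_getD (topics : List String) (d : PySem.Dict String (List String)) (c v : String) :
    (gvStep1 topics d c).getD v [] =
      if v = c ∧ (topics.contains c || topics.contains (c ++ "-imparfe")) = true
      then gvGrp topics c else d.getD v [] := by
  unfold gvStep1
  by_cases hv : v = c
  · subst hv
    by_cases m1 : v ∈ topics <;> by_cases m2 : v ++ "-imparfe" ∈ topics <;>
      simp [m1, m2, gvGrp, PySem.Dict.getD_modify, PySem.Dict.getD_insert]
  · by_cases m1 : c ∈ topics <;> by_cases m2 : c ++ "-imparfe" ∈ topics <;>
      simp [m1, m2, hv, PySem.Dict.getD_modify, PySem.Dict.getD_insert]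

lemma gvLoop1_get (topics : List String) : ∀ (cs : List String) (d : PySem.Dict String (List String)) (v : String),
    ((gvLoop1 topics cs d).contains v = true ↔
      (v ∈ cs ∧ (topics.contains v || topics.contains (v ++ "-imparfe")) = true) ∨ d.contains v = true) ∧
    (gvLoop1 topics cs d).getD v [] =
      (if v ∈ cs ∧ (topics.contains v || topics.contains (v ++ "-imparfe")) = true
       then gvGrp topics v else d.getD v []) := by
  intro cs
  induction cs with
  | nil => intro d v; simp [gvLoop1]
  | cons c cs ih =>
    intro d v
    obtain ⟨ih1, ih2⟩ := ih (gvStep1 topics d c) v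
    constructor
    · rw [show gvLoop1 topics (c :: cs) d = gvLoop1 topics cs (gvStep1 topics d c) from rfl, ih1,
        gvStep1_contains]
      constructor
      · rintro (⟨h, hc⟩ | ⟨hvc, hc⟩ | h)
        · exact Or.inl ⟨List.mem_cons_of_mem _ h, hc⟩
        · subst hvc; exact Or.inl ⟨List.mem_cons_self, hc⟩
        · exact Or.inr h
      · rintro (⟨h, hc⟩ | h)
        · rcases List.mem_cons.mp h with h | h
          · subst h; exact Or.inr (Or.inl ⟨rfl, hc⟩)
          · exact Or.inl ⟨h, hc⟩
        · exact Or.inr (Or.inr h)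
    · rw [show gvLoop1 topics (c :: cs) d = gvLoop1 topics cs (gvStep1 topics d c) from rfl, ih2,
        gvStep1_getD]
      by_cases hcnd : (topics.contains v || topics.contains (v ++ "-imparfe")) = true
      · by_cases hmem : v ∈ cs
        · rw [if_pos ⟨hmem, hcnd⟩, if_pos ⟨List.mem_cons_of_mem _ hmem, hcnd⟩]
        · rw [if_neg (fun h => hmem h.1)]
          by_cases hvc : v = c
          · rw [if_pos ⟨hvc, hvc ▸ hcnd⟩, if_pos ⟨by rw [hvc]; exact List.mem_cons_self, hcnd⟩]
            rw [hvc]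
          · rw [if_neg (fun h => hvc h.1),
              if_neg (by rintro ⟨h, _⟩; rcases List.mem_cons.mp h with h | h; exacts [hvc h, hmem h])]
      · have nAll : ¬(v ∈ cs ∧ (topics.contains v || topics.contains (v ++ "-imparfe")) = true) :=
          fun h => hcnd h.2
        have nCons : ¬(v ∈ c :: cs ∧ (topics.contains v || topics.contains (v ++ "-imparfe")) = true) :=
          fun h => hcnd h.2
        have nC : ¬(v = c ∧ (topics.contains c || topics.contains (c ++ "-imparfe")) = true) := by
          rintro ⟨hvc, hc⟩; exact hcnd (hvc ▸ hc)
        rw [if_neg nAll, if_neg nC, if_neg nCons]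

lemma gvGrp_nodup (topics : List String) (v : String) (hv : v ∈ commonVerbsA) : (gvGrp topics v).Nodup := by
  obtain ⟨_, _, _, h4, _⟩ := cv_facts v hv
  unfold gvGrp
  by_cases m1 : v ∈ topics <;> by_cases m2 : v ++ "-imparfe" ∈ topics <;>
    simp [m1, m2, h4]

lemma gvGrp_mem (topics : List String) (v t : String) :
    (t ∈ gvGrp topics v ↔ (t = v ∨ t = v ++ "-imparfe") ∧ t ∈ topics) := by
  unfold gvGrp
  by_cases m1 : v ∈ topics <;> by_cases m2 : v ++ "-imparfe" ∈ topics <;>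
    simp [m1, m2] <;> aesop

lemma gvInv_init (topics : List String) : gvInv topics [] (gvLoop1 topics commonVerbsA PySem.Dict.empty) := by
  intro v hv
  obtain ⟨h1, h2⟩ := gvLoop1_get topics commonVerbsA PySem.Dict.empty v
  constructor
  · intro hfalse
    rw [Bool.eq_false_iff] at hfalse
    have : ¬ ((topics.contains v || topics.contains (v ++ "-imparfe")) = true) := by
      intro hc; exact hfalse (h1.mpr (Or.inl ⟨hv, hc⟩))
    simp only [Bool.or_eq_true] at this
    push_neg at this
    exact ⟨Bool.eq_false_iff.mpr this.1, Bool.eq_false_iff.mpr this.2, by simp⟩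
  · intro htrue
    rcases h1.mp htrue with ⟨_, hc⟩ | h
    · rw [h2, if_pos ⟨hv, hc⟩]
      refine ⟨gvGrp_nodup topics v hv, ?_⟩
      intro t
      rw [gvGrp_mem]
      simp
    · simp [PySem.Dict.contains_empty] at h

-- ---- second loop ----

lemma gvStep2_contains (d : PySem.Dict String (List String)) (t v : String) :
    ((gvStep2 d t).contains v = true ↔ v = PySem.Str.replace t "-imparfe" "" ∨ d.contains v = true) := by
  unfold gvStep2
  by_cases h1 : d.contains (PySem.Str.replace t "-imparfe" "") = false <;>
    by_cases hvb : v = PySem.Str.replace t "-imparfe" "" <;>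
    simp_all [PySem.Dict.contains_modify, PySem.Dict.contains_insert, beq_iff_eq] <;>
    split <;>
    simp_all [PySem.Dict.contains_modify, beq_iff_eq]

lemma gvStep2_getD_ne (d : PySem.Dict String (List String)) (t v : String)
    (h : v ≠ PySem.Str.replace t "-imparfe" "") :
    (gvStep2 d t).getD v [] = d.getD v [] := by
  unfold gvStep2
  by_cases h1 : d.contains (PySem.Str.replace t "-imparfe" "") = false <;>
    simp_all [PySem.Dict.getD_modify, PySem.Dict.getD_insert] <;>
    split <;>
    simp_all [PySem.Dict.getD_modify]

lemma gvStep2_getD_self_of_contains (d : PySem.Dict String (List String)) (t : String)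
    (hdc : d.contains (PySem.Str.replace t "-imparfe" "") = true) :
    (gvStep2 d t).getD (PySem.Str.replace t "-imparfe" "") [] =
      (if t ∈ d.getD (PySem.Str.replace t "-imparfe" "") []
       then d.getD (PySem.Str.replace t "-imparfe" "") []
       else d.getD (PySem.Str.replace t "-imparfe" "") [] ++ [t]) := by
  unfold gvStep2
  simp only [hdc, Bool.true_eq_false, if_false]
  by_cases h2 : t ∈ d.getD (PySem.Str.replace t "-imparfe" "") []
  · have : (d.getD (PySem.Str.replace t "-imparfe" "") []).contains t = true :=
      List.contains_iff_mem.mpr h2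
    simp [this, h2]
  · have : (d.getD (PySem.Str.replace t "-imparfe" "") []).contains t = false := by
      rw [Bool.eq_false_iff]; intro h; exact h2 (List.contains_iff_mem.mp h)
    simp [this, h2, PySem.Dict.getD_modify]

lemma gvStep2_getD_self_of_not (d : PySem.Dict String (List String)) (t : String)
    (hdc : d.contains (PySem.Str.replace t "-imparfe" "") = false) :
    (gvStep2 d t).getD (PySem.Str.replace t "-imparfe" "") [] = [t] := by
  unfold gvStep2
  simp [hdc, PySem.Dict.getD_insert, PySem.Dict.getD_modify, PySem.Dict.contains_insert]

lemma gvInv_skip (topics p : List String) (d : PySem.Dict String (List String)) (t : String)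
    (hinv : gvInv topics p d)
    (hm : ∀ v ∈ commonVerbsA, gvMatches v t = false) :
    gvInv topics (p ++ [t]) d := by
  intro v hv
  obtain ⟨h1, h2⟩ := hinv v hv
  constructor
  · intro hf
    obtain ⟨a, b, c⟩ := h1 hf
    refine ⟨a, b, ?_⟩
    intro t' ht'
    rcases List.mem_append.mp ht' with h | h
    · exact c t' h
    · rw [List.mem_singleton.mp h]; exact hm v hv
  · intro ht
    obtain ⟨hnd, hmem⟩ := h2 ht
    refine ⟨hnd, ?_⟩
    intro t'
    rw [hmem t']
    constructor
    · rintro (h | ⟨hp, hq⟩)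
      · exact Or.inl h
      · exact Or.inr ⟨List.mem_append.mpr (Or.inl hp), hq⟩
    · rintro (h | ⟨hp, hq⟩)
      · exact Or.inl h
      · rcases List.mem_append.mp hp with h' | h'
        · exact Or.inr ⟨h', hq⟩
        · rw [List.mem_singleton.mp h'] at hq
          rw [hm v hv] at hq; cases hq
  
lemma gvInv_step2 (topics p : List String) (d : PySem.Dict String (List String)) (t : String)
    (hinv : gvInv topics p d)
    (hcnd : (PySem.Str.endswith t "-imparfe" || commonVerbsA.contains t) = true) :
    gvInv topics (p ++ [t]) (gvStep2 d t) := by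
  intro v hv
  obtain ⟨h1, h2⟩ := hinv v hv
  by_cases hvb : v = PySem.Str.replace t "-imparfe" ""
  · -- the touched key
    have hmt : gvMatches v t = true := (gvMatches_iff v t hv hcnd).mpr hvb.symm
    have hcont : (gvStep2 d t).contains v = true := (gvStep2_contains d t v).mpr (Or.inl hvb)
    constructor
    · intro hf; rw [hcont] at hf; cases hf
    · intro _
      have hb' : PySem.Str.replace t "-imparfe" "" = v := hvb.symm
      by_cases hdc : d.contains v = true
      · obtain ⟨hnd, hmem⟩ := h2 hdc
        have hself := gvStep2_getD_self_of_contains d t (by rw [hb']; exact hdc)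
        rw [hb'] at hself
        rw [hself]
        by_cases htg : t ∈ d.getD v []
        · rw [if_pos htg]
          refine ⟨hnd, ?_⟩
          intro t'
          rw [hmem t']
          have htF := (hmem t).mp htg
          constructor
          · rintro (h | ⟨hp, hq⟩)
            · exact Or.inl h
            · exact Or.inr ⟨List.mem_append.mpr (Or.inl hp), hq⟩
          · rintro (h | ⟨hp, hq⟩)
            · exact Or.inl h
            · rcases List.mem_append.mp hp with h' | h'
              · exact Or.inr ⟨h', hq⟩
              · rw [List.mem_singleton.mp h']
                exact htF
        · rw [if_neg htg]
          refine ⟨List.Nodup.append hnd (List.nodup_singleton t) (by simpa using htg), ?_⟩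
          intro t'
          rw [List.mem_append, hmem t', List.mem_singleton]
          constructor
          · rintro ((h | ⟨hp, hq⟩) | h)
            · exact Or.inl h
            · exact Or.inr ⟨List.mem_append.mpr (Or.inl hp), hq⟩
            · subst h; exact Or.inr ⟨List.mem_append.mpr (Or.inr (List.mem_singleton_self _)), hmt⟩
          · rintro (h | ⟨hp, hq⟩)
            · exact Or.inl (Or.inl h)
            · rcases List.mem_append.mp hp with h' | h'
              · exact Or.inl (Or.inr ⟨h', hq⟩)
              · exact Or.inr (List.mem_singleton.mp h')
      · -- key absent before: group becomes [t]
        have hdf : d.contains v = false := Bool.eq_false_iff.mpr hdc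
        obtain ⟨ha, hb, hc⟩ := h1 hdf
        have hself := gvStep2_getD_self_of_not d t (by rw [hb']; exact hdf)
        rw [hb'] at hself
        rw [hself]
        refine ⟨List.nodup_singleton t, ?_⟩
        intro t'
        rw [List.mem_singleton]
        constructor
        · intro h; subst h
          exact Or.inr ⟨List.mem_append.mpr (Or.inr (List.mem_singleton_self t')), hmt⟩
        · rintro (⟨(h | h), hmem'⟩ | ⟨hp, hq⟩)
          · subst h
            have := List.contains_iff_mem.mpr hmem'
            rw [ha] at this; cases this
          · subst h
            have := List.contains_iff_mem.mpr hmem'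
            rw [hb] at this; cases this
          · rcases List.mem_append.mp hp with h' | h'
            · rw [hc t' h'] at hq; cases hq
            · exact List.mem_singleton.mp h'
  · -- untouched keys
    have hmf : gvMatches v t = false := by
      rw [Bool.eq_false_iff]
      intro hm
      exact hvb ((gvMatches_iff v t hv hcnd).mp hm).symm
    have hcont : (gvStep2 d t).contains v = d.contains v := by
      by_cases hdv : d.contains v = true
      · rw [hdv]; exact (gvStep2_contains d t v).mpr (Or.inr hdv)
      · rw [Bool.not_eq_true] at hdv
        rw [hdv, Bool.eq_false_iff]
        intro h
        rcases (gvStep2_contains d t v).mp h with h' | h'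
        · exact hvb h'
        · rw [hdv] at h'; cases h'
    have hgd := gvStep2_getD_ne d t v hvb
    constructor
    · intro hf
      rw [hcont] at hf
      obtain ⟨a, b, c⟩ := h1 hf
      refine ⟨a, b, ?_⟩
      intro t' ht'
      rcases List.mem_append.mp ht' with h | h
      · exact c t' h
      · rw [List.mem_singleton.mp h]; exact hmf
    · intro ht
      rw [hcont] at ht
      obtain ⟨hnd, hmem⟩ := h2 ht
      rw [hgd]
      refine ⟨hnd, ?_⟩
      intro t'
      rw [hmem t']
      constructor
      · rintro (h | ⟨hp, hq⟩)
        · exact Or.inl h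
        · exact Or.inr ⟨List.mem_append.mpr (Or.inl hp), hq⟩
      · rintro (h | ⟨hp, hq⟩)
        · exact Or.inl h
        · rcases List.mem_append.mp hp with h' | h'
          · exact Or.inr ⟨h', hq⟩
          · rw [List.mem_singleton.mp h'] at hq
            rw [hmf] at hq; cases hq

lemma gvLoop2_dict (topics : List String) : ∀ (ts p : List String) (d : PySem.Dict String (List String)) (nv : List String),
    gvInv topics p d → gvInv topics (p ++ ts) (gvLoop2 ts d nv).1 := by
  intro ts
  induction ts with
  | nil => intro p d nv h; simpa [gvLoop2] using h
  | cons t ts ih =>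
    intro p d nv h
    rw [show p ++ t :: ts = (p ++ [t]) ++ ts by simp]
    simp only [gvLoop2]
    by_cases hcnd : (PySem.Str.endswith t "-imparfe" || commonVerbsA.contains t) = true
    · rw [if_pos hcnd]
      exact ih (p ++ [t]) _ nv (gvInv_step2 topics p d t h hcnd)
    · rw [if_neg hcnd]
      exact ih (p ++ [t]) d (nv ++ [t])
        (gvInv_skip topics p d t h (fun v hv => gvMatches_false v t hv (Bool.eq_false_iff.mpr hcnd)))

lemma gvLoop2_nv : ∀ (ts : List String) (d : PySem.Dict String (List String)) (nv : List String),
    (gvLoop2 ts d nv).2 = nv ++ ts.filter (fun t => !(PySem.Str.endswith t "-imparfe" || commonVerbsA.contains t)) := by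
  intro ts
  induction ts with
  | nil => intro d nv; simp [gvLoop2]
  | cons t ts ih =>
    intro d nv
    simp only [gvLoop2]
    rw [List.filter_cons]
    by_cases hcnd : (PySem.Str.endswith t "-imparfe" || commonVerbsA.contains t) = true
    · rw [if_pos hcnd, ih]
      have hb : (!(PySem.Str.endswith t "-imparfe" || commonVerbsA.contains t)) = false := by
        rw [hcnd]; rfl
      rw [hb]
      simp
    · rw [if_neg hcnd, ih]
      rw [Bool.not_eq_true] at hcnd
      have hb : (!(PySem.Str.endswith t "-imparfe" || commonVerbsA.contains t)) = true := by
        rw [hcnd]; rfl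
      rw [hb]
      simp

-- ---- flatten vs B's fold ----

lemma gv_per_verb (topics : List String) (d : PySem.Dict String (List String)) (v : String)
    (hinv : gvInv topics topics d) (hv : v ∈ commonVerbsA) :
    (if d.contains v then PySem.List.sorted (d.getD v []) (fun x => x) false else []) =
      PySem.List.sorted (PySem.Set.ofList (topics.filter (fun t => gvMatches v t))) (fun x => x) false := by
  obtain ⟨h1, h2⟩ := hinv v hv
  by_cases hc : d.contains v = true
  · obtain ⟨hnd, hmem⟩ := h2 hc
    rw [hc]
    simp only [if_true]
    apply PySem.List.sorted_eq_sorted_of_perm _ _ _ Function.injective_id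
    apply (List.perm_ext_iff_of_nodup hnd (PySem.Set.nodup_ofList _)).mpr
    intro t
    rw [hmem t, PySem.Set.mem_ofList, List.mem_filter]
    constructor
    · rintro (⟨(h | h), hm⟩ | ⟨hp, hq⟩)
      · exact ⟨hm, by rw [h]; exact gvMatches_self v hv⟩
      · exact ⟨hm, by rw [h]; exact gvMatches_imp v hv⟩
      · exact ⟨hp, hq⟩
    · rintro ⟨hp, hq⟩
      exact Or.inr ⟨hp, hq⟩
  · rw [Bool.not_eq_true] at hc
    obtain ⟨_, _, hall⟩ := h1 hc
    have : topics.filter (fun t => gvMatches v t) = [] := by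
      apply List.filter_eq_nil_iff.mpr
      intro t ht
      rw [hall t ht]; simp
    rw [hc, this]
    simp
    rfl

lemma gvFlatten_eq (topics : List String) (d : PySem.Dict String (List String))
    (hinv : gvInv topics topics d) :
    ∀ (cs : List String) (acc : List String), (∀ v ∈ cs, v ∈ commonVerbsA) →
    gvFlatten d cs acc = cs.foldl
      (fun acc v => acc ++ PySem.List.sorted (PySem.Set.ofList (topics.filter (fun t => gvMatches v t))) (fun x => x) false) acc := by
  intro cs
  induction cs with
  | nil => intro acc _; simp [gvFlatten]
  | cons c cs ih =>
    intro acc hsub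
    rw [show gvFlatten d (c :: cs) acc =
        gvFlatten d cs (if d.contains c then acc ++ PySem.List.sorted (d.getD c []) (fun x => x) false else acc) from rfl]
    rw [List.foldl_cons, ih _ (fun v hv => hsub v (List.mem_cons_of_mem _ hv))]
    congr 1
    have := gv_per_verb topics d c hinv (hsub c List.mem_cons_self)
    by_cases hc : d.contains c = true
    · rw [hc] at this ⊢
      simp only [if_true] at this ⊢
      rw [← this]
    · rw [Bool.not_eq_true] at hc
      rw [hc] at this ⊢
      simp only [Bool.false_eq_true, if_false] at this ⊢
      rw [← this, List.append_nil]

-- ===== VERDICT (by name: the statement is the Claim_ definition above) =====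
theorem group_verbs_spec : Claim_equal_group_verbs := by
  intro topics _
  unfold Spec_group_verbs group_verbs group_verbs_alt
  have hinv : gvInv topics topics (gvLoop2 topics (gvLoop1 topics commonVerbsA PySem.Dict.empty) []).1 := by
    have := gvLoop2_dict topics topics [] (gvLoop1 topics commonVerbsA PySem.Dict.empty) [] (gvInv_init topics)
    simpa using this
  refine Prod.ext ?_ ?_
  · simpa using gvFlatten_eq topics _ hinv commonVerbsA [] (fun v hv => hv)
  · rw [gvLoop2_nv]
    rw [show commonVerbsB = commonVerbsA from rfl]
    simp [Bool.not_or]
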